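-- pv_equiv track=rewrite | github.com/dxgiotsales-collab/dxgiotdoc | backend/dxg_doc_automation/api/main.py | _int_to_korean
-- ===== SOURCE A (Python) =====
-- _NUM_KOR_DIGITS = ["", "일", "이", "삼", "사", "오", "육", "칠", "팔", "구"]
--
-- _SMALL_UNITS = ["", "십", "백", "천"]
--
-- _LARGE_UNITS = ["", "만", "억", "조", "경"]
--
-- def _int_to_korean(num: int) -> str:
--     if num == 0:
--         return "영"
--
--     result_parts = []
--     group_index = 0
--
--     while num > 0:
--         group = num % 10000
--         num //= 10000
--
--         if group:
--             group_text = ""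
--             for i in range(4):
--                 digit = group % 10
--                 group //= 10
--                 if digit:
--                     digit_text = _NUM_KOR_DIGITS[digit]
--                     unit_text = _SMALL_UNITS[i]
--                     if digit == 1 and i > 0:
--                         digit_text = ""
--                     group_text = f"{digit_text}{unit_text}{group_text}"
--             group_text += _LARGE_UNITS[group_index]
--             result_parts.insert(0, group_text)
--
--         group_index += 1
--
--     return "".join(result_parts)
-- ===== SOURCE B (Python) =====
-- _NUM_KOR_DIGITS = ["", "일", "이", "삼", "사", "오", "육", "칠", "팔", "구"]
--
-- _SMALL_UNITS = ["", "십", "백", "천"]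
--
-- _LARGE_UNITS = ["", "만", "억", "조", "경"]
--
--
-- def _int_to_korean(num: int) -> str:
--     if num == 0:
--         return "영"
--     if num < 0:
--         return ""
--     s = str(num)
--     s = s.zfill(len(s) + (-len(s)) % 4)          # left-pad to a multiple of 4 digits
--     ngroups = len(s) // 4
--     out = ""
--     for g in range(ngroups):                      # most-significant group first
--         chunk = s[4 * g : 4 * g + 4]
--         if chunk != "0000":
--             for pos in range(4):                  # digits left to right
--                 d = ord(chunk[pos]) - 48
--                 if d:
--                     out += ("" if d == 1 and pos < 3 else _NUM_KOR_DIGITS[d]) + _SMALL_UNITS[3 - pos]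
--             out += _LARGE_UNITS[ngroups - 1 - g]
--     return out
-- ===== Notes on version B (the rewrite author's own statement) =====
-- stated objective: alternative
-- what changed: B replaces A's least-significant-first arithmetic group loop (repeated modulus and floor division with insert(0) plus a final join) by a string pipeline: convert the number to its decimal string, zero-pad it to whole four-digit groups, and render the groups most-significant-first by direct appends.
import Mathlib
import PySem

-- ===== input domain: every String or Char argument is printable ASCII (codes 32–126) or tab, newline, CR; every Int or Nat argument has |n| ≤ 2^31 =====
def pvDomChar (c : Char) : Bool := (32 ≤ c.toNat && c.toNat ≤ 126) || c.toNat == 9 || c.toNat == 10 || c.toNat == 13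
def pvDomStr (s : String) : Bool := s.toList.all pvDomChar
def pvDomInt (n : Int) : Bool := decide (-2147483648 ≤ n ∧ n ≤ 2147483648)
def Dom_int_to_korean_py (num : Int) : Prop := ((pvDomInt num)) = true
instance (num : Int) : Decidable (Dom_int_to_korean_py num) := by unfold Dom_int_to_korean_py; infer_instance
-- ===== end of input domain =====

-- B renders the number from its decimal string: zero-pad to a multiple of four characters and emit
-- the 4-character groups most-significant-first (objective: alternative decomposition, same cost).
-- A loops arithmetically over groups of num % 10000 least-significant-first.

-- ===== PORT A =====
def pvKorDigits : List String := ["", "일", "이", "삼", "사", "오", "육", "칠", "팔", "구"]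
def pvSmallUnits : List String := ["", "십", "백", "천"]
def pvLargeUnits : List String := ["", "만", "억", "조", "경"]

-- inner `for i in range(4)` body; state = (group, group_text)
def pvAGroupStep (st : Int × String) (i : Int) : Int × String :=
  let digit := PySem.Int.mod st.1 10
  let group := PySem.Int.floordiv st.1 10
  let text :=
    if digit ≠ 0 then
      let digitText := PySem.List.pyGetD pvKorDigits digit ""
      let unitText := PySem.List.pyGetD pvSmallUnits i ""
      let digitText := if digit = 1 ∧ 0 < i then "" else digitText
      digitText ++ unitText ++ st.2
    else st.2
  (group, text)

-- the `while num > 0` loop; parts accumulates result_parts (insert(0, ...))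
def pvALoop (num : Int) (groupIndex : Int) (parts : List String) : List String :=
  if h : 0 < num then
    let group := PySem.Int.mod num 10000
    let num' := PySem.Int.floordiv num 10000
    let parts' :=
      if group ≠ 0 then
        PySem.List.insert parts 0
          ((((PySem.List.pyRange 0 4 1).foldl pvAGroupStep (group, "")).2)
            ++ PySem.List.pyGetD pvLargeUnits groupIndex "")
      else parts
    pvALoop num' (groupIndex + 1) parts'
  else parts
termination_by num.toNat
decreasing_by
  have h2 : PySem.Int.floordiv num 10000 = num / 10000 :=
    PySem.Int.floordiv_eq_ediv_of_pos (by norm_num)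
  simp only [h2]; omega

def int_to_korean_py (num : Int) : String :=
  if num = 0 then "영"
  else PySem.Str.join "" (pvALoop num 0 [])

-- ===== PORT B =====
-- inner `for pos in range(4)` body of B (chunk = current 4-character group)
def pvBDigitStep (chunk : List Char) (out : String) (pos : Int) : String :=
  let d : Int := ((PySem.List.pyGetD chunk pos ' ').toNat : Int) - 48
  if d ≠ 0 then
    out ++ ((if d = 1 ∧ pos < 3 then "" else PySem.List.pyGetD pvKorDigits d "")
        ++ PySem.List.pyGetD pvSmallUnits (3 - pos) "")
  else out

-- outer `for g in range(ngroups)` body of B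
def pvBGroupStep (s : List Char) (ngroups : Int) (out : String) (g : Int) : String :=
  let chunk := PySem.List.slice s (some (4 * g)) (some (4 * g + 4))
  if chunk ≠ ['0', '0', '0', '0'] then
    ((PySem.List.pyRange 0 4 1).foldl (pvBDigitStep chunk) out)
      ++ PySem.List.pyGetD pvLargeUnits (ngroups - 1 - g) ""
  else out

def int_to_korean_py_alt (num : Int) : String :=
  if num = 0 then "영"
  else if num < 0 then ""
  else
    let s : List Char := (PySem.Int.toStr num).toList
    let s := PySem.Chars.zfill s ((s.length : Int) + PySem.Int.mod (-(s.length : Int)) 4)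
    let ngroups := PySem.Int.floordiv (s.length : Int) 4
    (PySem.List.pyRange 0 ngroups 1).foldl (pvBGroupStep s ngroups) ""

-- ===== PRECONDITION & SPEC =====
def Spec_int_to_korean_py (num : Int) (out : String) : Prop := out = int_to_korean_py_alt num
instance (num : Int) (out : String) : Decidable (Spec_int_to_korean_py num out) := by unfold Spec_int_to_korean_py; infer_instance

-- ===== CLAIM (what is proved, stated in full; the proofs are below) =====
def Claim_equal_int_to_korean_py : Prop := ∀ (num : Int), Dom_int_to_korean_py num → Spec_int_to_korean_py num (int_to_korean_py num)

-- ===== LEMMAS AND PROOFS =====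

def pvD (g i : Nat) : Nat := g / 10 ^ i % 10

def pvPart (g i : Nat) : String :=
  if pvD g i ≠ 0 then
    (if pvD g i = 1 ∧ 0 < i then "" else pvKorDigits.getD (pvD g i) "") ++ pvSmallUnits.getD i ""
  else ""

def pvGrp (g : Nat) : String := pvPart g 3 ++ pvPart g 2 ++ pvPart g 1 ++ pvPart g 0

lemma pv_chjoin (ls : List (List Char)) : PySem.Chars.join [] ls = ls.flatten := by
  induction ls with
  | nil => simp [PySem.Chars.join, List.intercalate]
  | cons a t ih =>
    cases t with
    | nil => simp [PySem.Chars.join, List.intercalate]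
    | cons b t' =>
      simp [PySem.Chars.join, List.intercalate] at ih ⊢
      simpa using ih

lemma pv_join_toList (parts : List String) :
    (PySem.Str.join "" parts).toList = (parts.map String.toList).flatten := by
  simp [PySem.Str.join, pv_chjoin]

lemma pv_join_append (l₁ l₂ : List String) :
    PySem.Str.join "" (l₁ ++ l₂) = PySem.Str.join "" l₁ ++ PySem.Str.join "" l₂ := by
  rw [← String.toList_inj]
  simp [pv_join_toList, pv_chjoin]

lemma pv_join_singleton (a : String) : PySem.Str.join "" [a] = a := by
  rw [← String.toList_inj]; simp [pv_join_toList, pv_chjoin]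

lemma pv_join_nil : PySem.Str.join "" ([] : List String) = "" := by
  rw [← String.toList_inj]; simp [pv_join_toList, pv_chjoin]

lemma pv_mod10 (n : Nat) : PySem.Int.mod (n : Int) 10 = ((n % 10 : Nat) : Int) := by
  exact_mod_cast PySem.Int.mod_natCast n 10

lemma pv_div10 (n : Nat) : PySem.Int.floordiv (n : Int) 10 = ((n / 10 : Nat) : Int) := by
  exact_mod_cast PySem.Int.floordiv_natCast n 10

lemma pv_step (m i : Nat) (t : String) :
    pvAGroupStep ((m : Int), t) ((i : Int)) =
      (((m / 10 : Nat) : Int),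
        (if m % 10 ≠ 0 then
            (if m % 10 = 1 ∧ 0 < i then "" else pvKorDigits.getD (m % 10) "")
              ++ pvSmallUnits.getD i ""
          else "") ++ t) := by
  simp only [pvAGroupStep, pv_mod10, pv_div10, PySem.List.pyGetD_natCast,
    Nat.cast_eq_zero, Nat.cast_eq_one, Nat.cast_pos, ne_eq]
  split_ifs <;> (rw [Prod.mk.injEq]; constructor <;> first | rfl | (rw [← String.toList_inj]; simp))

lemma pv_aInner (g : Nat) :
    ((PySem.List.pyRange 0 4 1).foldl pvAGroupStep ((g : Int), "")).2 = pvGrp g := by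
  have hr : PySem.List.pyRange 0 4 1 =
      [((0 : Nat) : Int), ((1 : Nat) : Int), ((2 : Nat) : Int), ((3 : Nat) : Int)] := by decide
  rw [hr]
  simp only [List.foldl, pv_step, Nat.div_div_eq_div_mul]
  rw [← String.toList_inj]
  simp [pvGrp, pvPart, pvD]

def pvTParts (n gi : Nat) : List String :=
  (if _h : 10000 ≤ n then pvTParts (n / 10000) (gi + 1) else [])
    ++ (if n % 10000 ≠ 0 then [pvGrp (n % 10000) ++ pvLargeUnits.getD gi ""] else [])
termination_by n
decreasing_by exact Nat.div_lt_self (by omega) (by norm_num)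

lemma pv_insert_zero (parts : List String) (v : String) :
    PySem.List.insert parts 0 v = v :: parts := by
  simp [PySem.List.insert, PySem.List.sliceIndices]

lemma pv_mod10000 (n : Nat) : PySem.Int.mod (n : Int) 10000 = ((n % 10000 : Nat) : Int) := by
  exact_mod_cast PySem.Int.mod_natCast n 10000

lemma pv_div10000 (n : Nat) : PySem.Int.floordiv (n : Int) 10000 = ((n / 10000 : Nat) : Int) := by
  exact_mod_cast PySem.Int.floordiv_natCast n 10000

lemma pv_TParts_zero (gi : Nat) : pvTParts 0 gi = [] := by
  rw [pvTParts]; simp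

lemma pv_aLoop (n : Nat) : ∀ (gi : Nat) (parts : List String),
    pvALoop (n : Int) (gi : Int) parts = pvTParts n gi ++ parts := by
  induction n using Nat.strong_induction_on with
  | _ n ih =>
    intro gi parts
    rw [pvALoop, pvTParts]
    by_cases hn : 0 < n
    · have hc : (0 : Int) < (n : Int) := by exact_mod_cast hn
      rw [dif_pos hc]
      simp only [pv_mod10000, pv_div10000, pv_aInner, PySem.List.pyGetD_natCast]
      have hcast : ((gi : Int) + 1) = ((gi + 1 : Nat) : Int) := by push_cast; ring
      have hrec := ih (n / 10000) (Nat.div_lt_self hn (by norm_num))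
      by_cases hz : n % 10000 = 0
      · have hge : 10000 ≤ n := by omega
        simp only [hz, Nat.cast_zero, ne_eq, not_true_eq_false, if_false]
        rw [hcast, hrec]
        simp [hge, hz]
      · have hz' : ((n % 10000 : Nat) : Int) ≠ 0 := by exact_mod_cast hz
        simp only [hz', ne_eq, not_false_eq_true, if_true]
        rw [pv_insert_zero, hcast, hrec]
        by_cases hge : 10000 ≤ n
        · simp [hge, hz]
        · have hq : n / 10000 = 0 := by omega
          rw [hq, pv_TParts_zero]
          simp [hge, hz]
    · have hn0 : n = 0 := by omega
      have hc : ¬ (0 : Int) < (n : Int) := by exact_mod_cast hn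
      rw [dif_neg hc]
      subst hn0
      simp

def pvT (n : Nat) (gi : Nat) : String :=
  (if _h : 10000 ≤ n then pvT (n / 10000) (gi + 1) else "")
    ++ (if n % 10000 ≠ 0 then pvGrp (n % 10000) ++ pvLargeUnits.getD gi "" else "")
termination_by n
decreasing_by exact Nat.div_lt_self (by omega) (by norm_num)

lemma pv_joinT (n : Nat) : ∀ (gi : Nat), PySem.Str.join "" (pvTParts n gi) = pvT n gi := by
  induction n using Nat.strong_induction_on with
  | _ n ih =>
    intro gi
    rw [pvTParts, pvT, pv_join_append]
    by_cases hge : 10000 ≤ n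
    · rw [dif_pos hge, dif_pos hge, ih (n / 10000) (Nat.div_lt_self (by omega) (by norm_num))]
      by_cases hz : n % 10000 = 0 <;> simp [hz, pv_join_singleton, pv_join_nil]
    · rw [dif_neg hge, dif_neg hge, pv_join_nil]
      by_cases hz : n % 10000 = 0 <;> simp [hz, pv_join_singleton, pv_join_nil]

lemma pv_aEq (n : Nat) (hn : 0 < n) : int_to_korean_py (n : Int) = pvT n 0 := by
  have h0 : ((n : Int)) ≠ 0 := by exact_mod_cast hn.ne'
  rw [int_to_korean_py, if_neg h0]
  have : ((0 : Int)) = ((0 : Nat) : Int) := by norm_num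
  rw [this, pv_aLoop, List.append_nil, pv_joinT]

def pvPad4 (n : Nat) : List Char :=
  [Nat.digitChar (n / 1000 % 10), Nat.digitChar (n / 100 % 10),
   Nat.digitChar (n / 10 % 10), Nat.digitChar (n % 10)]

def pvSch (n : Nat) : List Char :=
  if _h : 10000 ≤ n then pvSch (n / 10000) ++ pvPad4 n else pvPad4 n
termination_by n
decreasing_by exact Nat.div_lt_self (by omega) (by norm_num)

def pvG (n : Nat) : Nat :=
  if _h : 10000 ≤ n then pvG (n / 10000) + 1 else 1
termination_by n
decreasing_by exact Nat.div_lt_self (by omega) (by norm_num)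

lemma pv_digitChar_toNat (d : Nat) (h : d < 10) : (Nat.digitChar d).toNat = 48 + d := by
  interval_cases d <;> rfl

lemma pv_digitChar_eq_zero (d : Nat) (h : d < 10) : Nat.digitChar d = '0' ↔ d = 0 := by
  interval_cases d <;> simp <;> decide

lemma pv_toDigitsCore (f : Nat) : ∀ (n : Nat) (l : List Char), 0 < n → n < f →
    Nat.toDigitsCore 10 f n l = ((Nat.digits 10 n).map Nat.digitChar).reverse ++ l := by
  induction f with
  | zero => intro n l h1 h2; omega
  | succ f ih =>
    intro n l h1 h2
    rw [Nat.toDigitsCore]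
    have hd : Nat.digits 10 n = n % 10 :: Nat.digits 10 (n / 10) := Nat.digits_def' (by norm_num) h1
    by_cases hq : n / 10 = 0
    · simp [hq, hd, Nat.digits_zero]
    · have hq1 : 0 < n / 10 := Nat.pos_of_ne_zero hq
      have hq2 : n / 10 < f := by
        have := Nat.div_lt_self h1 (show 1 < 10 by norm_num)
        omega
      simp only [hq, if_false]
      rw [ih (n / 10) _ hq1 hq2, hd]
      simp

lemma pv_toChars (n : Nat) (hn : 0 < n) :
    (PySem.Int.toStr (n : Int)).toList = ((Nat.digits 10 n).map Nat.digitChar).reverse := by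
  rw [PySem.Int.toList_toStr, PySem.Int.toChars]
  have h1 : ¬ ((n : Int) < 0) := by omega
  rw [if_neg h1]
  have h2 : ((n : Int)).toNat = n := Int.toNat_natCast n
  rw [h2, Nat.toDigits]
  rw [pv_toDigitsCore (n + 1) n [] hn (by omega), List.append_nil]

lemma pv_digits_split (n : Nat) (h : 1000 ≤ n) :
    Nat.digits 10 n =
      n % 10 :: n / 10 % 10 :: n / 100 % 10 :: n / 1000 % 10 :: Nat.digits 10 (n / 10000) := by
  have h1 : 0 < n := by omega
  have h2 : 0 < n / 10 := by omega
  have h3 : 0 < n / 100 := by omega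
  have h4 : 0 < n / 1000 := by omega
  rw [Nat.digits_def' (show 1 < 10 by norm_num) h1,
      Nat.digits_def' (show 1 < 10 by norm_num) h2,
      show n / 10 / 10 = n / 100 by omega,
      Nat.digits_def' (show 1 < 10 by norm_num) h3,
      show n / 100 / 10 = n / 1000 by omega,
      Nat.digits_def' (show 1 < 10 by norm_num) h4,
      show n / 1000 / 10 = n / 10000 by omega]

lemma pv_chars_pad (n : Nat) (hn : 0 < n) :
    List.replicate ((4 - (Nat.digits 10 n).length % 4) % 4) '0'
      ++ ((Nat.digits 10 n).map Nat.digitChar).reverse = pvSch n := by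
  induction n using Nat.strong_induction_on with
  | _ n ih =>
    by_cases hge : 10000 ≤ n
    · have hsplit := pv_digits_split n (by omega)
      have hq : 0 < n / 10000 := by omega
      have ihq := ih (n / 10000) (Nat.div_lt_self (by omega) (by norm_num)) hq
      rw [pvSch, dif_pos hge, hsplit]
      simp only [List.length_cons, List.map_cons, List.reverse_cons]
      rw [show ∀ L : Nat, (4 - (L + 1 + 1 + 1 + 1) % 4) % 4 = (4 - L % 4) % 4 from by omega]
      rw [← ihq]
      simp [pvPad4, List.append_assoc]
    · rw [pvSch, dif_neg hge]
      by_cases h3 : 1000 ≤ n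
      · have hsplit := pv_digits_split n h3
        have hq : n / 10000 = 0 := by omega
        rw [hsplit, hq]
        simp [pvPad4]
      · by_cases h2 : 100 ≤ n
        · rw [Nat.digits_def' (show 1 < 10 by norm_num) (by omega : 0 < n),
              Nat.digits_def' (show 1 < 10 by norm_num) (by omega : 0 < n / 10),
              show n / 10 / 10 = n / 100 by omega,
              Nat.digits_def' (show 1 < 10 by norm_num) (by omega : 0 < n / 100),
              show n / 100 / 10 = n / 1000 by omega,
              show n / 1000 = 0 by omega]
          simp [pvPad4, show Nat.digitChar 0 = '0' from rfl, show n / 100 % 10 = n / 100 by omega, show n / 1000 % 10 = 0 by omega,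
            List.replicate]
        · by_cases h1 : 10 ≤ n
          · rw [Nat.digits_def' (show 1 < 10 by norm_num) (by omega : 0 < n),
                Nat.digits_def' (show 1 < 10 by norm_num) (by omega : 0 < n / 10),
                show n / 10 / 10 = 0 by omega]
            simp [pvPad4, show Nat.digitChar 0 = '0' from rfl, show n / 10 % 10 = n / 10 by omega, show n / 100 % 10 = 0 by omega,
              show n / 1000 % 10 = 0 by omega, List.replicate]
          · rw [Nat.digits_def' (show 1 < 10 by norm_num) (by omega : 0 < n),
                show n / 10 = 0 by omega]
            simp [pvPad4, show Nat.digitChar 0 = '0' from rfl, show n % 10 = n by omega, show n / 10 % 10 = 0 by omega,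
              show n / 100 % 10 = 0 by omega, show n / 1000 % 10 = 0 by omega, List.replicate]

lemma pv_zfill_pad (c : Char) (rest : List Char) (hc : ¬(c = '+' ∨ c = '-')) (p : Nat) :
    PySem.Chars.zfill (c :: rest) (((c :: rest).length : Int) + (p : Int))
      = List.replicate p '0' ++ (c :: rest) := by
  by_cases hp : p = 0
  · subst hp
    rw [PySem.Chars.zfill, if_pos (by simp)]
    simp
  · rw [PySem.Chars.zfill, if_neg (by push_cast; omega)]
    simp only [hc, if_false]
    congr 1
    congr 1
    push_cast
    omega

lemma pv_SchEq (n : Nat) (hn : 0 < n) :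
    PySem.Chars.zfill ((PySem.Int.toStr (n : Int)).toList)
      ((((PySem.Int.toStr (n : Int)).toList.length : Int))
        + PySem.Int.mod (-(((PySem.Int.toStr (n : Int)).toList.length : Int))) 4) = pvSch n := by
  rw [pv_toChars n hn]
  set cs := ((Nat.digits 10 n).map Nat.digitChar).reverse with hcs
  have hL : cs.length = (Nat.digits 10 n).length := by simp [hcs]
  have hmod : PySem.Int.mod (-(cs.length : Int)) 4
      = (((4 - cs.length % 4) % 4 : Nat) : Int) := by
    rw [PySem.Int.mod_eq_emod_of_pos (by norm_num)]
    omega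
  rw [hmod]
  have hne : cs ≠ [] := by
    simp [hcs, Nat.digits_ne_nil_iff_ne_zero]
    omega
  obtain ⟨c, rest, hcrest⟩ := List.exists_cons_of_ne_nil hne
  have hcsign : ¬(c = '+' ∨ c = '-') := by
    have hcmem : c ∈ cs := by rw [hcrest]; exact List.mem_cons_self
    rw [hcs, List.mem_reverse] at hcmem
    obtain ⟨d, hd, hdc⟩ := List.mem_map.mp hcmem
    have hdlt : d < 10 := Nat.digits_lt_base (by norm_num) hd
    subst hdc
    interval_cases d <;> decide
  rw [hcrest, pv_zfill_pad c rest hcsign, ← hcrest, hL]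
  exact pv_chars_pad n hn

lemma pv_lenSch (n : Nat) : (pvSch n).length = 4 * pvG n := by
  induction n using Nat.strong_induction_on with
  | _ n ih =>
    rw [pvSch, pvG]
    by_cases hge : 10000 ≤ n
    · rw [dif_pos hge, dif_pos hge]
      simp [ih (n / 10000) (Nat.div_lt_self (by omega) (by norm_num)), pvPad4]
      ring
    · rw [dif_neg hge, dif_neg hge]
      simp [pvPad4]

lemma pv_pad4_zero (n : Nat) : pvPad4 n = ['0', '0', '0', '0'] ↔ n % 10000 = 0 := by
  rw [pvPad4]
  simp only [List.cons.injEq, and_true]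
  rw [pv_digitChar_eq_zero _ (by omega), pv_digitChar_eq_zero _ (by omega),
      pv_digitChar_eq_zero _ (by omega), pv_digitChar_eq_zero _ (by omega)]
  omega

lemma pv_append_if (c : Prop) [Decidable c] (s a : String) :
    (if c then s ++ a else s) = s ++ (if c then a else "") := by
  split_ifs <;> first | rfl | (rw [← String.toList_inj]; simp)

lemma pv_bInner (m : Nat) (out : String) :
    (PySem.List.pyRange 0 4 1).foldl (pvBDigitStep (pvPad4 m)) out = out ++ pvGrp (m % 10000) := by
  have hr : PySem.List.pyRange 0 4 1 =
      [((0 : Nat) : Int), ((1 : Nat) : Int), ((2 : Nat) : Int), ((3 : Nat) : Int)] := by decide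
  rw [hr]
  simp only [List.foldl, pvBDigitStep, PySem.List.pyGetD_natCast]
  simp only [pvPad4,
    show ∀ a b c d : Char, ([a, b, c, d].getD 0 ' ') = a from fun _ _ _ _ => rfl,
    show ∀ a b c d : Char, ([a, b, c, d].getD 1 ' ') = b from fun _ _ _ _ => rfl,
    show ∀ a b c d : Char, ([a, b, c, d].getD 2 ' ') = c from fun _ _ _ _ => rfl,
    show ∀ a b c d : Char, ([a, b, c, d].getD 3 ' ') = d from fun _ _ _ _ => rfl]
  rw [pv_digitChar_toNat (m / 1000 % 10) (by omega), pv_digitChar_toNat (m / 100 % 10) (by omega),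
      pv_digitChar_toNat (m / 10 % 10) (by omega), pv_digitChar_toNat (m % 10) (by omega)]
  have e : ∀ d : Nat, ((48 + d : Nat) : Int) - 48 = ((d : Nat) : Int) := by intro d; push_cast; ring
  rw [e, e, e, e]
  simp only [pv_append_if]
  norm_num
  rw [← String.toList_inj]
  norm_num [pvGrp, pvPart, pvD, apply_ite String.toList,
    show (PySem.List.pyGetD pvSmallUnits 3 "") = pvSmallUnits.getD 3 "" from rfl,
    show (PySem.List.pyGetD pvSmallUnits 2 "") = pvSmallUnits.getD 2 "" from rfl,
    show (PySem.List.pyGetD pvSmallUnits 1 "") = pvSmallUnits.getD 1 "" from rfl,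
    show (PySem.List.pyGetD pvSmallUnits 0 "") = pvSmallUnits.getD 0 "" from rfl]
  norm_cast
  simp only [Nat.dvd_iff_mod_eq_zero]
  rw [show m / 1000 % 10 = m % 10000 / 1000 % 10 from by omega,
      show m / 100 % 10 = m % 10000 / 100 % 10 from by omega,
      show m / 10 % 10 = m % 10000 / 10 % 10 from by omega,
      show m % 10 = m % 10000 % 10 from by omega]
  simp only [PySem.List.pyGetD_natCast, List.getD]

lemma pv_slice4 (t c : List Char) (k : Nat) (hk : 4 * k + 4 ≤ t.length) :
    PySem.List.slice (t ++ c) (some ((4 * k : Nat) : Int)) (some ((4 * k + 4 : Nat) : Int))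
      = PySem.List.slice t (some ((4 * k : Nat) : Int)) (some ((4 * k + 4 : Nat) : Int)) := by
  rw [PySem.List.slice_natCast, PySem.List.slice_natCast,
      List.drop_append_of_le_length (by omega),
      List.take_append_of_le_length (by simp; omega)]

lemma pv_bMain (n : Nat) : 0 < n → ∀ (q : Nat) (out : String) (N : Int),
    N = (q : Int) + (pvG n : Int) →
    (PySem.List.pyRange 0 ((pvG n : Int)) 1).foldl (pvBGroupStep (pvSch n) N) out
      = out ++ pvT n q := by
  induction n using Nat.strong_induction_on with
  | _ n ih =>
    intro hn q out N hN
    by_cases hge : 10000 ≤ n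
    · -- inductive case: peel the last chunk
      have hq4 : 0 < n / 10000 := by omega
      have hG : pvG n = pvG (n / 10000) + 1 := by rw [pvG, dif_pos hge]
      have hS : pvSch n = pvSch (n / 10000) ++ pvPad4 n := by rw [pvSch, dif_pos hge]
      have hlen : (pvSch (n / 10000)).length = 4 * pvG (n / 10000) := pv_lenSch _
      set G' := pvG (n / 10000) with hG'
      have hcast : ((pvG n : Nat) : Int) = ((G' : Nat) : Int) + 1 := by rw [hG]; push_cast; ring
      rw [hcast, PySem.List.pyRange_one_succ_right (by positivity), List.foldl_append]
      have hpre : (PySem.List.pyRange 0 ((G' : Nat) : Int) 1).foldl (pvBGroupStep (pvSch n) N) out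
          = (PySem.List.pyRange 0 ((G' : Nat) : Int) 1).foldl
              (pvBGroupStep (pvSch (n / 10000)) N) out := by
        apply PySem.List.foldl_congr_mem
        intro acc g hg
        rw [PySem.List.mem_pyRange_one] at hg
        obtain ⟨k, hk⟩ : ∃ k : Nat, g = (k : Int) := ⟨g.toNat, by omega⟩
        have hklt : k < G' := by omega
        subst hk
        simp only [pvBGroupStep]
        rw [show (4 * (k : Int)) = ((4 * k : Nat) : Int) from by push_cast; ring,
            show ((4 * k : Nat) : Int) + 4 = ((4 * k + 4 : Nat) : Int) from by push_cast; ring,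
            hS, pv_slice4 _ _ k (by omega)]
      rw [hpre, ih (n / 10000) (Nat.div_lt_self (by omega) (by norm_num)) hq4 (q + 1) out N
            (by rw [hN, hcast]; push_cast; ring)]
      -- last chunk
      rw [List.foldl_cons, List.foldl_nil]
      simp only [pvBGroupStep]
      rw [hS]
      rw [show (4 * ((G' : Nat) : Int)) = ((4 * G' : Nat) : Int) from by push_cast; ring,
          show ((4 * G' : Nat) : Int) + 4 = ((4 * G' + 4 : Nat) : Int) from by push_cast; ring]
      rw [PySem.List.slice_natCast, show (4 * G' : Nat) = (pvSch (n / 10000)).length from by omega,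
          List.drop_left]
      rw [show ((pvSch (n / 10000)).length + 4 - (pvSch (n / 10000)).length : Nat) = 4 from by omega]
      rw [List.take_of_length_le (by simp [pvPad4])]
      conv_rhs => rw [pvT]
      rw [dif_pos hge]
      have hidx : N - 1 - ((G' : Nat) : Int) = ((q : Nat) : Int) := by rw [hN, hcast]; ring
      by_cases hz : n % 10000 = 0
      · rw [if_neg (by simp [pv_pad4_zero, hz]), if_neg (by simp [hz])]
        rw [← String.toList_inj]; simp
      · rw [if_pos (by simp [pv_pad4_zero, hz]), if_pos (by simp [hz])]
        rw [pv_bInner, hidx, PySem.List.pyGetD_natCast]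
        rw [← String.toList_inj]; simp
    · -- base case: a single chunk
      have hG : pvG n = 1 := by rw [pvG, dif_neg hge]
      have hS : pvSch n = pvPad4 n := by rw [pvSch, dif_neg hge]
      rw [hG, hS]
      rw [show ((1 : Nat) : Int) = (1 : Int) from by norm_num,
          show PySem.List.pyRange 0 1 1 = [(0 : Int)] from by decide]
      rw [List.foldl_cons, List.foldl_nil]
      simp only [pvBGroupStep]
      rw [show (4 * (0 : Int)) = (((0 : Nat) : Int)) from by norm_num,
          show (((0 : Nat) : Int)) + 4 = ((4 : Nat) : Int) from by norm_num]
      rw [PySem.List.slice_natCast, List.drop_zero, List.take_of_length_le (by simp [pvPad4])]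
      have hz : ¬ (n % 10000 = 0) := by omega
      rw [if_pos (by simp [pv_pad4_zero, hz])]
      rw [pv_bInner, show N - 1 - 0 = ((q : Nat) : Int) from by rw [hN, hG]; push_cast; ring,
          PySem.List.pyGetD_natCast]
      rw [pvT, dif_neg hge, if_pos (by simp [hz])]
      rw [← String.toList_inj]; simp

lemma pv_bEq (n : Nat) (hn : 0 < n) : int_to_korean_py_alt (n : Int) = pvT n 0 := by
  rw [int_to_korean_py_alt]
  rw [if_neg (by exact_mod_cast hn.ne'), if_neg (by omega)]
  simp only [pv_SchEq n hn]
  have hlen : ((pvSch n).length : Int) = ((4 * pvG n : Nat) : Int) := by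
    exact_mod_cast congrArg Nat.cast (pv_lenSch n)
  rw [hlen]
  have hng : PySem.Int.floordiv ((4 * pvG n : Nat) : Int) 4 = ((pvG n : Nat) : Int) := by
    rw [show ((4 : Int)) = ((4 : Nat) : Int) from by norm_num, PySem.Int.floordiv_natCast]
    norm_num
  rw [hng, pv_bMain n hn 0 "" _ (by norm_num)]
  rw [← String.toList_inj]; simp

-- ===== VERDICT (by name: the statement is the Claim_ definition above) =====
theorem int_to_korean_py_spec : Claim_equal_int_to_korean_py := by
  intro num _hdom
  unfold Spec_int_to_korean_py
  rcases lt_trichotomy num 0 with hlt | heq | hgt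
  · have h0 : num ≠ 0 := by omega
    have hA : pvALoop num 0 [] = [] := by rw [pvALoop, dif_neg (by omega)]
    rw [int_to_korean_py, if_neg h0, hA, pv_join_nil, int_to_korean_py_alt, if_neg h0, if_pos hlt]
  · subst heq; rfl
  · have hn : 0 < num.toNat := by omega
    have hrep : num = ((num.toNat : Nat) : Int) := by omega
    rw [hrep, pv_aEq _ hn, pv_bEq _ hn]
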